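-- pv_equiv track=rewrite | github.com/luisboris/Recipeek | python/vectors.py | vectorize_yy_binary
-- ===== SOURCE A (Python) =====
-- def vectorize_yy_binary(original_lines, list_lines):
--     yy = list()
--     sequence = '00'
--     for i in range(len(original_lines)):
--         y = 1 if original_lines[i] in list_lines else 0
--         yy.append(y)
--         sequence += str(y)
--
--     # clean false positives
--     sequence += '00'
--     for j in range(len(sequence)):
--         if sequence[j:j+5] == '00100':
--             yy[j] = 0
--
--     return yy
-- ===== SOURCE B (Python) =====
-- def vectorize_yy_binary(original_lines, list_lines):
--     lookup = set(list_lines)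
--     yy = [1 if line in lookup else 0 for line in original_lines]
--     n = len(yy)
--
--     def zero(k):
--         return k < 0 or k >= n or yy[k] == 0
--
--     return [0 if yy[i] == 1 and zero(i - 2) and zero(i - 1) and zero(i + 1) and zero(i + 2)
--             else yy[i]
--             for i in range(n)]
-- ===== Notes on version B (the rewrite author's own statement) =====
-- stated objective: faster
-- what changed: B replaces the list-membership test by a precomputed set and drops the padded-string '00100' scan entirely: it decides each clear directly by index arithmetic on the frozen 0/1 flag list (out-of-range neighbours count as 0, like A's '00' padding).
import Mathlib
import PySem

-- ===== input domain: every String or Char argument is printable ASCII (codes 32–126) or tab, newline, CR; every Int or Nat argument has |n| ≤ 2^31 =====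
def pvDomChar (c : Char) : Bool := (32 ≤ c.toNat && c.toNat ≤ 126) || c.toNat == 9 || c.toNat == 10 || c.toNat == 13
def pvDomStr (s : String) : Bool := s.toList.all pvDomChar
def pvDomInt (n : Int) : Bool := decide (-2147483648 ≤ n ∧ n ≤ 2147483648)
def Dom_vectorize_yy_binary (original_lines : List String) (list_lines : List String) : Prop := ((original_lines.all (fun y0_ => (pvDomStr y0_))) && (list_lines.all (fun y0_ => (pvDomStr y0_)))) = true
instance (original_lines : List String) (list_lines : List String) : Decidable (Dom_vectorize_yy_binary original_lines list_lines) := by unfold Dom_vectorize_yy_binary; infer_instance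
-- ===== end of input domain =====

-- B replaces A's O(m)-per-line list membership by a precomputed set and replaces A's
-- padded-string '00100' scan by a direct indexed neighbour check on the frozen flag list.

-- ===== PORT A =====
-- Python's 'sequence' string is carried as its List Char (PySem.Chars convention).
def vectorize_yy_binary (original_lines : List String) (list_lines : List String) : List Int :=
  let st := (PySem.List.pyRange 0 (PySem.List.len original_lines)).foldl
    (fun (st : List Int × List Char) i =>
      let y : Int := if list_lines.contains (PySem.List.pyGetD original_lines i "") then 1 else 0
      (st.1 ++ [y], st.2 ++ PySem.Int.toChars y))
    ([], ['0', '0'])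
  let sequence : List Char := st.2 ++ ['0', '0']
  (PySem.List.pyRange 0 (PySem.List.len sequence)).foldl
    (fun yy j =>
      if PySem.List.slice sequence (some j) (some (j + 5)) = ['0', '0', '1', '0', '0']
      then PySem.List.pySetD yy j 0 else yy)
    st.1

-- ===== PORT B =====
def vectorize_yy_binary_alt (original_lines : List String) (list_lines : List String) : List Int :=
  let lookup : PySem.Set String := PySem.Set.ofList list_lines
  let yy : List Int := original_lines.map (fun line => if PySem.Set.contains lookup line then 1 else 0)
  let n : Nat := yy.length
  let zero : Int → Bool := fun k => decide (k < 0 ∨ (n : Int) ≤ k ∨ yy.getD k.toNat 0 = 0)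
  (PySem.List.pyRange 0 (n : Int)).map
    (fun i =>
      if PySem.List.pyGetD yy i 0 = 1 ∧ zero (i - 2) ∧ zero (i - 1) ∧ zero (i + 1) ∧ zero (i + 2)
      then 0 else PySem.List.pyGetD yy i 0)

-- ===== PRECONDITION & SPEC =====
def Spec_vectorize_yy_binary (original_lines : List String) (list_lines : List String) (out : List Int) : Prop := out = vectorize_yy_binary_alt original_lines list_lines
instance (original_lines : List String) (list_lines : List String) (out : List Int) : Decidable (Spec_vectorize_yy_binary original_lines list_lines out) := by unfold Spec_vectorize_yy_binary; infer_instance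

-- ===== CLAIM (what is proved, stated in full; the proofs are below) =====
def Claim_equal_vectorize_yy_binary : Prop := ∀ (original_lines : List String) (list_lines : List String), Dom_vectorize_yy_binary original_lines list_lines → Spec_vectorize_yy_binary original_lines list_lines (vectorize_yy_binary original_lines list_lines)

-- ===== LEMMAS AND PROOFS =====

def chfn (ll : List String) (s : String) : Char := if ll.contains s then '1' else '0'
def flfn (ll : List String) (s : String) : Int := if ll.contains s then 1 else 0

lemma toChars_flfn (ll : List String) (s : String) :
    PySem.Int.toChars (flfn ll s) = [chfn ll s] := by
  unfold flfn chfn; split_ifs <;> decide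

lemma firstLoop (ll : List String) (l : List String) (a1 : List Int) (a2 : List Char) :
    l.foldl (fun (st : List Int × List Char) s =>
      (st.1 ++ [if ll.contains s then (1:Int) else 0],
       st.2 ++ PySem.Int.toChars (if ll.contains s then (1:Int) else 0))) (a1, a2)
    = (a1 ++ l.map (flfn ll), a2 ++ l.map (chfn ll)) := by
  induction l generalizing a1 a2 with
  | nil => simp
  | cons x xs ih =>
    simp only [List.foldl_cons]
    have h1 : (if ll.contains x = true then (1:Int) else 0) = flfn ll x := rfl
    rw [h1, toChars_flfn, ih]
    simp

lemma take5_iff (l : List Char) (a b c d e : Char) :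
    l.take 5 = [a, b, c, d, e] ↔
      l[0]? = some a ∧ l[1]? = some b ∧ l[2]? = some c ∧ l[3]? = some d ∧ l[4]? = some e := by
  rcases l with _ | ⟨x1, _ | ⟨x2, _ | ⟨x3, _ | ⟨x4, _ | ⟨x5, tl⟩⟩⟩⟩⟩ <;> simp

lemma pySetD_natCast' {α : Type} (xs : List α) (n : Nat) (v : α) :
    PySem.List.pySetD xs (n : Int) v = xs.set n v := by
  simp only [PySem.List.pySetD, PySem.List.pySet?, PySem.List.pyIdx?]
  split_ifs with h1 h2 <;> simp_all
  rw [List.set_eq_of_length_le]; omega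

lemma setLoop_length (cond : Nat → Prop) [DecidablePred cond] (m : Nat) (ys : List Int) :
    ((List.range m).foldl (fun yy k => if cond k then yy.set k 0 else yy) ys).length
      = ys.length := by
  induction m generalizing ys with
  | zero => simp
  | succ m ih =>
    rw [List.range_succ, List.foldl_append]
    simp only [List.foldl_cons, List.foldl_nil]
    split <;> simp [ih]

lemma setLoop_getElem? (cond : Nat → Prop) [DecidablePred cond] (m : Nat) (ys : List Int) (i : Nat) :
    ((List.range m).foldl (fun yy k => if cond k then yy.set k 0 else yy) ys)[i]?
      = if i < m ∧ cond i then ys[i]?.map (fun _ => (0:Int)) else ys[i]? := by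
  induction m with
  | zero => simp
  | succ m ih =>
    rw [List.range_succ, List.foldl_append]
    simp only [List.foldl_cons, List.foldl_nil]
    have hlen := setLoop_length cond m ys
    by_cases hc : cond m
    · rw [if_pos hc, List.getElem?_set, hlen, ih]
      rcases Nat.lt_trichotomy i m with h | h | h
      · have h1 : m ≠ i := by omega
        have h2 : i < m + 1 := by omega
        simp [h1, h, h2]
      · subst h
        have h2 : i < i + 1 := by omega
        simp only [Nat.lt_irrefl, ite_false, h2, hc, and_true, if_pos]
        by_cases hl : i < ys.length
        · simp [hl]
        · have : ys[i]? = none := by simp; omega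
          simp [hl]
      · have h1 : m ≠ i := by omega
        have h2 : ¬ i < m := by omega
        have h3 : ¬ i < m + 1 := by omega
        simp [h1, h2, h3]
    · rw [if_neg hc, ih]
      by_cases him : i = m
      · subst him; simp [hc]
      · by_cases hi : i < m
        · have : i < m + 1 := by omega
          simp [hi, this]
        · have : ¬ i < m + 1 := by omega
          simp [hi, this]

lemma seqGet (cs : List Char) (x : Nat) :
    ('0' :: '0' :: (cs ++ ['0', '0']))[x]? =
      if x < 2 then some '0'
      else if x < cs.length + 2 then cs[x - 2]?
      else if x < cs.length + 4 then some '0'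
      else none := by
  match x with
  | 0 => simp
  | 1 => simp
  | (m+2) =>
    simp only [List.getElem?_cons_succ]
    by_cases h : m < cs.length
    · rw [List.getElem?_append, if_pos h]
      have h1 : ¬ m + 2 < 2 := by omega
      have h2 : m + 2 < cs.length + 2 := by omega
      simp [h1, h2]
    · rw [List.getElem?_append, if_neg h]
      have h1 : ¬ m + 2 < 2 := by omega
      by_cases h2 : m + 2 < cs.length + 2
      · omega
      · by_cases h3 : m + 2 < cs.length + 4
        · have : m - cs.length < 2 := by omega
          interval_cases hm : (m - cs.length) <;> simp [h1, h2, h3]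
        · have : ¬ m - cs.length < 2 := by omega
          have : ['0','0'][m - cs.length]? = none := by
            rw [List.getElem?_eq_none]; simp; omega
          simp [h1, h2, h3, this]

def csl (ll ol : List String) : List Char := ol.map (chfn ll)
def fll (ll ol : List String) : List Int := ol.map (flfn ll)
def seqq (ll ol : List String) : List Char := '0' :: '0' :: (csl ll ol ++ ['0', '0'])
abbrev condA (ll ol : List String) (k : Nat) : Prop :=
  ((seqq ll ol).drop k).take 5 = ['0', '0', '1', '0', '0']

lemma ch1 (ll : List String) (s : String) : (chfn ll s = '1') ↔ (flfn ll s = 1) := by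
  unfold chfn flfn; split_ifs <;> simp
lemma ch0 (ll : List String) (s : String) : (chfn ll s = '0') ↔ (flfn ll s = 0) := by
  unfold chfn flfn; split_ifs <;> simp

lemma fll_getD (ll ol : List String) (j : Nat) (hj : j < ol.length) :
    (fll ll ol).getD j 0 = flfn ll ol[j] := by
  unfold fll
  rw [List.getD_eq_getElem _ _ (by simpa using hj)]
  simp

lemma csl_get (ll ol : List String) (j : Nat) (hj : j < ol.length) :
    (csl ll ol)[j]? = some (chfn ll ol[j]) := by
  unfold csl
  rw [List.getElem?_eq_getElem (by simpa using hj)]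
  simp

lemma seqZero (ll ol : List String) (x : Nat) :
    (('0' :: '0' :: (csl ll ol ++ ['0', '0']))[x]? = some '0') ↔
      (x < 2 ∨ (2 ≤ x ∧ x < ol.length + 2 ∧ (fll ll ol).getD (x - 2) 0 = 0) ∨
        (ol.length + 2 ≤ x ∧ x < ol.length + 4)) := by
  have hcs : (csl ll ol).length = ol.length := by simp [csl]
  rw [seqGet, hcs]
  by_cases h0 : x < 2
  · simp [h0]
  · rw [if_neg h0]
    by_cases h1 : x < ol.length + 2
    · rw [if_pos h1, csl_get ll ol (x - 2) (by omega)]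
      simp only [Option.some_inj]
      rw [ch0, ← fll_getD ll ol (x - 2) (by omega)]
      omega
    · rw [if_neg h1]
      by_cases h2 : x < ol.length + 4
      · rw [if_pos h2]
        simp only [true_iff]
        omega
      · rw [if_neg h2]
        constructor
        · intro h; cases h
        · intro h; omega

lemma seqOne (ll ol : List String) (x : Nat) :
    (('0' :: '0' :: (csl ll ol ++ ['0', '0']))[x]? = some '1') ↔
      (2 ≤ x ∧ x < ol.length + 2 ∧ (fll ll ol).getD (x - 2) 0 = 1) := by
  have hcs : (csl ll ol).length = ol.length := by simp [csl]
  rw [seqGet, hcs]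
  by_cases h0 : x < 2
  · rw [if_pos h0]
    simp only [Option.some_inj]
    constructor
    · intro h; exact absurd h (by decide)
    · intro h; omega
  · rw [if_neg h0]
    by_cases h1 : x < ol.length + 2
    · rw [if_pos h1, csl_get ll ol (x - 2) (by omega)]
      simp only [Option.some_inj]
      rw [ch1, ← fll_getD ll ol (x - 2) (by omega)]
      omega
    · rw [if_neg h1]
      by_cases h2 : x < ol.length + 4
      · rw [if_pos h2]
        simp only [Option.some_inj]
        constructor
        · intro h; exact absurd h (by decide)
        · intro h; omega
      · rw [if_neg h2]
        constructor
        · intro h; cases h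
        · intro h; omega

lemma cond_iff (ll ol : List String) (i : Nat) (hi : i < ol.length) :
    condA ll ol i ↔
      ((fll ll ol).getD i 0 = 1 ∧
       (2 ≤ i → (fll ll ol).getD (i - 2) 0 = 0) ∧
       (1 ≤ i → (fll ll ol).getD (i - 1) 0 = 0) ∧
       (i + 1 < ol.length → (fll ll ol).getD (i + 1) 0 = 0) ∧
       (i + 2 < ol.length → (fll ll ol).getD (i + 2) 0 = 0)) := by
  unfold condA seqq
  rw [take5_iff]
  simp only [List.getElem?_drop]
  rw [seqZero, seqZero, seqOne, seqZero, seqZero]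
  have h02 : i + 0 - 2 = i - 2 := by omega
  have h12 : i + 1 - 2 = i - 1 := by omega
  have h22 : i + 2 - 2 = i := by omega
  have h32 : i + 3 - 2 = i + 1 := by omega
  have h42 : i + 4 - 2 = i + 2 := by omega
  rw [h02, h12, h22, h32, h42]
  omega

lemma A_eval (ol ll : List String) :
    vectorize_yy_binary ol ll =
      (List.range (ol.length + 4)).foldl
        (fun yy k => if condA ll ol k then yy.set k 0 else yy) (fll ll ol) := by
  unfold vectorize_yy_binary
  rw [PySem.List.foldl_pyRange_pyGetD ol ""
    (fun (st : List Int × List Char) v =>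
      (st.1 ++ [if ll.contains v then (1:Int) else 0], st.2 ++ PySem.Int.toChars (if ll.contains v then (1:Int) else 0)))
    (([], ['0','0']) : List Int × List Char) (le_refl 0)]
  simp only [Int.toNat_zero, List.drop_zero]
  simp only [firstLoop]
  simp only [List.nil_append]
  have hseq : ((['0','0'] ++ csl ll ol) ++ ['0','0'] : List Char) = seqq ll ol := by
    simp [seqq]
  have hcsl : ol.map (chfn ll) = csl ll ol := rfl
  have hfll : ol.map (flfn ll) = fll ll ol := rfl
  rw [hcsl, hfll, hseq]
  have hlen : PySem.List.len (seqq ll ol) = ((ol.length + 4 : Nat) : Int) := by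
    simp only [PySem.List.len, seqq, csl]
    norm_cast
    simp
  rw [hlen, PySem.List.pyRange_zero_natCast, List.foldl_map]
  have hfun : (fun (yy : List Int) (k : Nat) =>
      if PySem.List.slice (seqq ll ol) (some (k : Int)) (some ((k : Int) + 5)) = ['0','0','1','0','0']
      then PySem.List.pySetD yy (k : Int) 0 else yy)
      = (fun (yy : List Int) (k : Nat) => if condA ll ol k then yy.set k 0 else yy) := by
    funext yy k
    have hs : PySem.List.slice (seqq ll ol) (some (k : Int)) (some ((k : Int) + 5))
        = ((seqq ll ol).drop k).take 5 := by
      have h5 := PySem.List.slice_natCast_add (seqq ll ol) k 5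
      push_cast at h5
      exact h5
    rw [hs, pySetD_natCast']
  rw [hfun]

theorem AB (ol ll : List String) : vectorize_yy_binary ol ll = vectorize_yy_binary_alt ol ll := by
  rw [A_eval]
  unfold vectorize_yy_binary_alt
  have hyy : (fun line => if PySem.Set.contains (PySem.Set.ofList ll) line then (1:Int) else 0)
      = flfn ll := by
    funext s
    by_cases h : s ∈ ll <;>
      simp [PySem.Set.contains, flfn, PySem.Set.mem_ofList, h]
  simp only [hyy]
  have hfll : ol.map (flfn ll) = fll ll ol := rfl
  rw [hfll]
  have hn : (fll ll ol).length = ol.length := by simp [fll]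
  rw [hn, PySem.List.pyRange_zero_natCast, List.map_map]
  apply List.ext_getElem?
  intro i
  rw [setLoop_getElem? (condA ll ol) (ol.length + 4) (fll ll ol) i]
  rw [List.getElem?_map]
  by_cases hi : i < ol.length
  · have hrange : (List.range ol.length)[i]? = some i := by simp [hi]
    rw [hrange]
    have hilen : i < (fll ll ol).length := by omega
    have hget : (fll ll ol)[i]? = some ((fll ll ol).getD i 0) := by
      rw [List.getElem?_eq_getElem hilen, List.getD_eq_getElem _ _ hilen]
    rw [hget]
    simp only [Option.map_some, Function.comp_apply, PySem.List.pyGetD_natCast,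
      decide_eq_true_eq]
    have t2 : ((i:Int) - 2).toNat = i - 2 := by omega
    have t1 : ((i:Int) - 1).toNat = i - 1 := by omega
    have p1 : ((i:Int) + 1).toNat = i + 1 := by omega
    have p2 : ((i:Int) + 2).toNat = i + 2 := by omega
    simp only [t1, t2, p1, p2]
    have hC : condA ll ol i ↔
        ((fll ll ol).getD i 0 = 1 ∧
         ((i:Int) - 2 < 0 ∨ (ol.length : Int) ≤ (i:Int) - 2 ∨ (fll ll ol).getD (i - 2) 0 = 0) ∧
         ((i:Int) - 1 < 0 ∨ (ol.length : Int) ≤ (i:Int) - 1 ∨ (fll ll ol).getD (i - 1) 0 = 0) ∧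
         ((i:Int) + 1 < 0 ∨ (ol.length : Int) ≤ (i:Int) + 1 ∨ (fll ll ol).getD (i + 1) 0 = 0) ∧
         ((i:Int) + 2 < 0 ∨ (ol.length : Int) ≤ (i:Int) + 2 ∨ (fll ll ol).getD (i + 2) 0 = 0)) := by
      rw [cond_iff ll ol i hi]
      omega
    by_cases hc : condA ll ol i
    · rw [if_pos ⟨by omega, hc⟩, if_pos (hC.mp hc)]
    · rw [if_neg (fun h => hc h.2), if_neg (fun h => hc (hC.mpr h))]
  · have hrange : (List.range ol.length)[i]? = none := by
      simp
      omega
    rw [hrange]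
    have hnone : (fll ll ol)[i]? = none := by
      rw [List.getElem?_eq_none]; omega
    rw [hnone]
    simp

-- ===== VERDICT (by name: the statement is the Claim_ definition above) =====
theorem vectorize_yy_binary_spec : Claim_equal_vectorize_yy_binary := by
  intro original_lines list_lines _
  unfold Spec_vectorize_yy_binary
  exact AB original_lines list_lines
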